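-- pv_equiv track=rewrite | github.com/stmharry/stmharry.github.io | .agents/skills/google-scholar-cv-sync/scripts/sync_google_scholar_cv.py | find_publications_slice
-- ===== SOURCE A (Python) =====
-- def find_publications_slice(content: str) -> tuple[int, int]:
--     key = "publications: ["
--     start = content.find(key)
--     if start == -1:
--         raise ValueError("Could not find publications array in content.ts")
--     arr_start = content.find("[", start)
--     depth = 0
--     for i in range(arr_start, len(content)):
--         ch = content[i]
--         if ch == "[":
--             depth += 1
--         elif ch == "]":
--             depth -= 1
--             if depth == 0:
--                 return arr_start, i
--     raise ValueError("Could not find end of publications array")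
-- ===== SOURCE B (Python) =====
-- def find_publications_slice(content: str) -> tuple[int, int]:
--     key = "publications: ["
--     start = content.find(key)
--     if start == -1:
--         raise ValueError("Could not find publications array in content.ts")
--     arr_start = content.find("[", start)
--     depth = 0
--     pos = arr_start
--     while True:
--         next_open = content.find("[", pos)
--         next_close = content.find("]", pos)
--         if next_open == -1 and next_close == -1:
--             raise ValueError("Could not find end of publications array")
--         if next_close == -1 or (next_open != -1 and next_open < next_close):
--             depth += 1
--             pos = next_open + 1
--         else:
--             depth -= 1
--             if depth == 0:
--                 return arr_start, next_close
--             pos = next_close + 1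
-- ===== Notes on version B (the rewrite author's own statement) =====
-- stated objective: alternative
-- what changed: Replaces A's character-by-character scan over range(arr_start, len(content)) with a bracket-to-bracket jump loop that repeatedly uses str.find('[', pos) / str.find(']', pos) and steps directly to the nearer bracket, keeping the same depth counter and the same raise behaviour.
import Mathlib
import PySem

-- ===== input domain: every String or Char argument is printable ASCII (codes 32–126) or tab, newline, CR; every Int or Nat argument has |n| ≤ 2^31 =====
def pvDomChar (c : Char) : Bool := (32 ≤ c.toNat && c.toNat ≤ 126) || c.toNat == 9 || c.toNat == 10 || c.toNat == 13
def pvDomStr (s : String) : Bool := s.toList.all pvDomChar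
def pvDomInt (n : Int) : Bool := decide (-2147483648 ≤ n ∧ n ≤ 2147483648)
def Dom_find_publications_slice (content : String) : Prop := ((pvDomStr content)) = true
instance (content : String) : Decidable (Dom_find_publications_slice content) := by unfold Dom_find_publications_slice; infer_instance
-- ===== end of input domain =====

-- B replaces A's character-by-character depth scan by a bracket-to-bracket jump loop using
-- str.find (objective: alternative decomposition; same results, including on which inputs it raises).

-- ===== PORT A =====
-- the 'for i in range(arr_start, len(content))' loop of A: range list, depth accumulator
def pvAGo (cs : List Char) : List Int → Int → Option Int
  | [], _ => none
  | i :: rest, depth =>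
    match PySem.List.pyGet? cs i with
    | none => none  -- IndexError (unreachable: i comes from range(arr_start, len))
    | some ch =>
      if ch = '[' then pvAGo cs rest (depth + 1)
      else if ch = ']' then
        if depth - 1 = 0 then some i
        else pvAGo cs rest (depth - 1)
      else pvAGo cs rest depth

def find_publications_slice (content : String) : Int × Int :=
  let start := PySem.Str.find content "publications: ["
  if start = -1 then (-1, -1)  -- A raises ValueError here; excluded by Pre_
  else
    let arr_start := PySem.Str.findFrom content "[" start
    match pvAGo content.toList (PySem.List.pyRange arr_start (PySem.Str.len content)) 0 with
    | some i => (arr_start, i)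
    | none => (-1, -1)  -- A raises ValueError here; excluded by Pre_

-- ===== PORT B =====
-- needed by pvBGo's decreasing_by: a hit of find(c, pos) lies in [pos, len)
theorem pvFindFrom_gt (cs sub : List Char) (p : Nat) (h : cs.length < p) :
    PySem.Chars.findFrom cs sub (p : Int) = -1 := by
  unfold PySem.Chars.findFrom
  simp only []
  have h1 : ¬ ((p : Int) < 0) := by omega
  rw [if_neg h1, if_pos (by exact_mod_cast h)]

theorem pvFindFrom_char_ne (cs : List Char) (c : Char) (p : Nat)
    (h : PySem.Chars.findFrom cs [c] (p : Int) ≠ -1) :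
    p ≤ (PySem.Chars.findFrom cs [c] (p : Int)).toNat ∧
    (PySem.Chars.findFrom cs [c] (p : Int)).toNat < cs.length ∧
    cs[(PySem.Chars.findFrom cs [c] (p : Int)).toNat]? = some c := by
  have hp : p ≤ cs.length := by
    by_contra hgt
    exact h (pvFindFrom_gt cs [c] p (by omega))
  obtain ⟨h1, h2, _h3⟩ := PySem.Chars.findFrom_natCast_spec cs [c] p hp h
  set r := PySem.Chars.findFrom cs [c] (p : Int) with hr
  obtain ⟨t, ht⟩ := h2
  have hhead : (cs.drop r.toNat).head? = some c := by rw [← ht]; rfl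
  rw [List.head?_drop] at hhead
  have hlt : r.toNat < cs.length := by
    by_contra hge
    rw [List.getElem?_eq_none (by omega)] at hhead
    simp at hhead
  exact ⟨by omega, hlt, hhead⟩

-- the 'while True' loop of B: jump to the nearer of find('[',pos) / find(']',pos)
def pvBGo (cs : List Char) (pos : Nat) (depth : Int) : Option Int :=
  let nextOpen := PySem.Chars.findFrom cs ['['] (pos : Int)
  let nextClose := PySem.Chars.findFrom cs [']'] (pos : Int)
  if nextOpen = -1 ∧ nextClose = -1 then none  -- B raises ValueError here; excluded by Pre_
  else if nextClose = -1 ∨ (nextOpen ≠ -1 ∧ nextOpen < nextClose) then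
    pvBGo cs (nextOpen.toNat + 1) (depth + 1)
  else if depth - 1 = 0 then some nextClose
  else pvBGo cs (nextClose.toNat + 1) (depth - 1)
termination_by cs.length + 1 - pos
decreasing_by
  · have hno : PySem.Chars.findFrom cs ['['] (pos : Int) ≠ -1 := by tauto
    have := pvFindFrom_char_ne cs '[' pos hno
    omega
  · have hnc : PySem.Chars.findFrom cs [']'] (pos : Int) ≠ -1 := by tauto
    have := pvFindFrom_char_ne cs ']' pos hnc
    omega

def find_publications_slice_alt (content : String) : Int × Int :=
  let start := PySem.Str.find content "publications: ["
  if start = -1 then (-1, -1)  -- B raises ValueError here; excluded by Pre_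
  else
    let arr_start := PySem.Str.findFrom content "[" start
    -- pos = arr_start is a nonnegative int whenever the loop is entered (Pre_ guarantees it)
    match pvBGo content.toList arr_start.toNat 0 with
    | some e => (arr_start, e)
    | none => (-1, -1)  -- B raises ValueError here; excluded by Pre_

-- ===== PRECONDITION & SPEC =====
-- Pre_ excludes exactly the inputs on which A (and B) raise ValueError: the key
-- "publications: [" absent, or no position j after arr_start where a ']' closes the
-- bracket run opened at arr_start (bracket counts over content[arr_start:j+1] balance).
def Pre_find_publications_slice (content : String) : Prop :=
  let cs := content.toList
  let start := PySem.Str.find content "publications: ["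
  let arr_start := PySem.Str.findFrom content "[" start
  0 ≤ start ∧ 0 ≤ arr_start ∧
  ∃ j ∈ List.range cs.length, arr_start.toNat ≤ j ∧ cs[j]? = some ']' ∧
    ((cs.take (j + 1)).drop arr_start.toNat).count '[' =
      ((cs.take (j + 1)).drop arr_start.toNat).count ']'
instance (content : String) : Decidable (Pre_find_publications_slice content) := by
  unfold Pre_find_publications_slice; infer_instance

def pvWitness_find_publications_slice : String := "publications: []"

def Spec_find_publications_slice (content : String) (out : Int × Int) : Prop := out = find_publications_slice_alt content
instance (content : String) (out : Int × Int) : Decidable (Spec_find_publications_slice content out) := by unfold Spec_find_publications_slice; infer_instance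

-- ===== CLAIM (what is proved, stated in full; the proofs are below) =====
def Claim_equal_find_publications_slice : Prop := ∀ (content : String), Dom_find_publications_slice content → Pre_find_publications_slice content → Spec_find_publications_slice content (find_publications_slice content)

-- ===== LEMMAS AND PROOFS =====

theorem pvSingletonPrefix (c : Char) (l : List Char) : [c] <+: l ↔ l.head? = some c := by
  constructor
  · rintro ⟨t, rfl⟩; rfl
  · intro h
    cases l with
    | nil => simp at h
    | cons x xs =>
      simp only [List.head?_cons, Option.some.injEq] at h
      subst h
      exact ⟨xs, rfl⟩

theorem pvOcc (cs : List Char) (c : Char) (j : Nat) : [c] <+: cs.drop j ↔ cs[j]? = some c := by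
  rw [pvSingletonPrefix, List.head?_drop]

theorem pvFindFrom_nil (cs : List Char) (c : Char) (p : Nat) (hp : cs.length ≤ p) :
    PySem.Chars.findFrom cs [c] (p : Int) = -1 := by
  rcases Nat.lt_or_ge cs.length p with h | h
  · exact pvFindFrom_gt cs [c] p h
  · have hpl : p = cs.length := by omega
    rw [hpl, PySem.Chars.findFrom_natCast_eq_neg_one_iff cs [c] cs.length le_rfl]
    simp

theorem pvFindFrom_hit (cs : List Char) (c : Char) (p : Nat) (hp : p < cs.length)
    (hc : cs[p]? = some c) : PySem.Chars.findFrom cs [c] (p : Int) = (p : Int) := by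
  have hocc : [c] <+: cs.drop p := (pvOcc cs c p).2 hc
  have hne : PySem.Chars.findFrom cs [c] (p : Int) ≠ -1 := by
    rw [Ne, PySem.Chars.findFrom_natCast_eq_neg_one_iff cs [c] p (by omega)]
    intro hnin
    exact hnin hocc.isInfix
  obtain ⟨h1, _, h3⟩ := PySem.Chars.findFrom_natCast_spec cs [c] p (by omega) hne
  have hle : (PySem.Chars.findFrom cs [c] (p : Int)).toNat ≤ p := by
    by_contra hgt
    exact h3 p le_rfl (by omega) hocc
  omega

theorem pvFindFrom_skip (cs : List Char) (c c' : Char) (p : Nat) (hp : p < cs.length)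
    (hc : cs[p]? = some c') (hne : c' ≠ c) :
    PySem.Chars.findFrom cs [c] (p : Int) = PySem.Chars.findFrom cs [c] ((p + 1 : Nat) : Int) := by
  by_cases hL : PySem.Chars.findFrom cs [c] (p : Int) = -1
  · rw [hL, eq_comm]
    rcases Nat.lt_or_ge cs.length (p + 1) with h1 | h1
    · exact pvFindFrom_nil cs c (p + 1) (by omega)
    · rw [PySem.Chars.findFrom_natCast_eq_neg_one_iff cs [c] (p + 1) (by omega)]
      rw [PySem.Chars.findFrom_natCast_eq_neg_one_iff cs [c] p (by omega)] at hL
      intro hin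
      apply hL
      rw [List.singleton_infix_iff] at hin ⊢
      rw [List.drop_eq_getElem_cons hp]
      exact List.mem_cons_of_mem _ hin
  · obtain ⟨h1, h2, h3⟩ := PySem.Chars.findFrom_natCast_spec cs [c] p (by omega) hL
    obtain ⟨hb1, hb2, hb3⟩ := pvFindFrom_char_ne cs c p hL
    set L := PySem.Chars.findFrom cs [c] (p : Int) with hLdef
    have hLp : L.toNat ≠ p := by
      intro hEq
      rw [hEq] at hb3
      exact hne (Option.some.inj (hc.symm.trans hb3))
    have hp1 : p + 1 ≤ cs.length := by omega
    have hRne : PySem.Chars.findFrom cs [c] ((p + 1 : Nat) : Int) ≠ -1 := by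
      rw [Ne, PySem.Chars.findFrom_natCast_eq_neg_one_iff cs [c] (p + 1) hp1]
      intro hnin
      apply hnin
      have hLocc : [c] <+: cs.drop L.toNat := (pvOcc cs c L.toNat).2 hb3
      have hd : cs.drop L.toNat = (cs.drop (p + 1)).drop (L.toNat - (p + 1)) := by
        rw [List.drop_drop]; congr 1; omega
      rw [hd] at hLocc
      exact hLocc.isInfix.trans (List.drop_suffix _ _).isInfix
    obtain ⟨g1, g2, g3⟩ := PySem.Chars.findFrom_natCast_spec cs [c] (p + 1) hp1 hRne
    obtain ⟨gb1, gb2, gb3⟩ := pvFindFrom_char_ne cs c (p + 1) hRne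
    set R := PySem.Chars.findFrom cs [c] ((p + 1 : Nat) : Int) with hRdef
    have hLR : ¬ (L.toNat < R.toNat) := fun hlt =>
      g3 L.toNat (by omega) hlt ((pvOcc cs c L.toNat).2 hb3)
    have hRL : ¬ (R.toNat < L.toNat) := fun hlt =>
      h3 R.toNat (by omega) hlt ((pvOcc cs c R.toNat).2 gb3)
    omega

-- one unfolding of pvBGo in each of the four situations at position p
theorem pvBGo_nil (cs : List Char) (p : Nat) (depth : Int) (hp : cs.length ≤ p) :
    pvBGo cs p depth = none := by
  conv_lhs => rw [pvBGo]
  rw [pvFindFrom_nil cs '[' p hp, pvFindFrom_nil cs ']' p hp]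
  simp

theorem pvFindFrom_nonneg_of_ne (cs : List Char) (c : Char) (p : Nat)
    (h : PySem.Chars.findFrom cs [c] (p : Int) ≠ -1) :
    (p : Int) ≤ PySem.Chars.findFrom cs [c] (p : Int) := by
  have hp : p ≤ cs.length := by
    by_contra hgt
    exact h (pvFindFrom_gt cs [c] p (by omega))
  exact (PySem.Chars.findFrom_natCast_spec cs [c] p hp h).1

theorem pvBGo_step_open (cs : List Char) (p : Nat) (depth : Int) (hp : p < cs.length)
    (hc : cs[p]? = some '[') : pvBGo cs p depth = pvBGo cs (p + 1) (depth + 1) := by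
  conv_lhs => rw [pvBGo]
  have hno : PySem.Chars.findFrom cs ['['] (p : Int) = (p : Int) :=
    pvFindFrom_hit cs '[' p hp hc
  have hnc : PySem.Chars.findFrom cs [']'] (p : Int)
      = PySem.Chars.findFrom cs [']'] ((p + 1 : Nat) : Int) :=
    pvFindFrom_skip cs ']' '[' p hp hc (by decide)
  rw [hno, hnc]
  rw [if_neg (by rintro ⟨h1, -⟩; omega)]
  rw [if_pos ?hg]
  case hg =>
    by_cases h9 : PySem.Chars.findFrom cs [']'] ((p + 1 : Nat) : Int) = -1
    · exact Or.inl h9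
    · have := pvFindFrom_nonneg_of_ne cs ']' (p + 1) h9
      right
      refine ⟨by omega, by omega⟩
  simp only [Int.toNat_natCast]

theorem pvBGo_step_close (cs : List Char) (p : Nat) (depth : Int) (hp : p < cs.length)
    (hc : cs[p]? = some ']') :
    pvBGo cs p depth = if depth - 1 = 0 then some (p : Int) else pvBGo cs (p + 1) (depth - 1) := by
  conv_lhs => rw [pvBGo]
  have hnc : PySem.Chars.findFrom cs [']'] (p : Int) = (p : Int) :=
    pvFindFrom_hit cs ']' p hp hc
  have hno : PySem.Chars.findFrom cs ['['] (p : Int)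
      = PySem.Chars.findFrom cs ['['] ((p + 1 : Nat) : Int) :=
    pvFindFrom_skip cs '[' ']' p hp hc (by decide)
  rw [hnc, hno]
  rw [if_neg (by rintro ⟨-, h2⟩; omega)]
  rw [if_neg ?hg]
  case hg =>
    rintro (h9 | ⟨h9, h10⟩)
    · omega
    · have := pvFindFrom_nonneg_of_ne cs '[' (p + 1) h9
      omega
  by_cases hd : depth - 1 = 0
  · rw [if_pos hd, if_pos hd]
  · rw [if_neg hd, if_neg hd]
    simp only [Int.toNat_natCast]

theorem pvBGo_step_other (cs : List Char) (p : Nat) (depth : Int) (hp : p < cs.length)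
    (c : Char) (hc : cs[p]? = some c) (h1 : c ≠ '[') (h2 : c ≠ ']') :
    pvBGo cs p depth = pvBGo cs (p + 1) depth := by
  conv_lhs => rw [pvBGo]
  conv_rhs => rw [pvBGo]
  rw [pvFindFrom_skip cs '[' c p hp hc h1, pvFindFrom_skip cs ']' c p hp hc h2]

theorem pvMain (cs : List Char) (n : Nat) :
    ∀ (p : Nat) (depth : Int), cs.length ≤ p + n →
      pvAGo cs (PySem.List.pyRange (p : Int) (cs.length : Int)) depth = pvBGo cs p depth := by
  induction n with
  | zero =>
    intro p depth hlen
    rw [PySem.List.pyRange_one_eq_nil (by exact_mod_cast hlen), pvBGo_nil cs p depth (by omega)]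
    simp [pvAGo]
  | succ n ih =>
    intro p depth hlen
    rcases Nat.lt_or_ge p cs.length with hp | hp
    swap
    · -- past the end: same as the base case
      rw [PySem.List.pyRange_one_eq_nil (by exact_mod_cast hp), pvBGo_nil cs p depth hp]
      simp [pvAGo]
    have hc : cs[p]? = some cs[p] := List.getElem?_eq_getElem hp
    rw [PySem.List.pyRange_one_cons (by exact_mod_cast hp)]
    have hcast : (p : Int) + 1 = ((p + 1 : Nat) : Int) := by push_cast; ring
    rw [hcast]
    have hget : PySem.List.pyGet? cs ((p : Nat) : Int) = some cs[p] := by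
      rw [PySem.List.pyGet?_natCast, hc]
    rw [pvAGo, hget]
    by_cases hopen : cs[p] = '['
    · rw [pvBGo_step_open cs p depth hp (by rw [hc, hopen])]
      simp only [hopen, reduceIte]
      exact ih (p + 1) (depth + 1) (by omega)
    by_cases hclose : cs[p] = ']'
    · rw [pvBGo_step_close cs p depth hp (by rw [hc, hclose])]
      have h1 : (cs[p] = '[') = False := by simp [hopen]
      simp only [hclose, reduceIte]
      rw [if_neg (show ¬ (']' = '[') from by decide)]
      by_cases hd : depth - 1 = 0
      · rw [if_pos hd, if_pos hd]
      · rw [if_neg hd, if_neg hd]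
        exact ih (p + 1) (depth - 1) (by omega)
    · rw [pvBGo_step_other cs p depth hp cs[p] hc hopen hclose]
      have h1 : (cs[p] = '[') = False := by simp [hopen]
      have h2 : (cs[p] = ']') = False := by simp [hclose]
      simp only [h1, h2, if_false]
      exact ih (p + 1) depth (by omega)

-- ===== VERDICT (by name: the statement is the Claim_ definition above) =====
theorem find_publications_slice_spec : Claim_equal_find_publications_slice := by
  intro content _hdom hpre
  unfold Spec_find_publications_slice
  obtain ⟨hs, ha, -⟩ := hpre
  unfold find_publications_slice find_publications_slice_alt
  simp only [PySem.Str.len_eq]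
  rw [if_neg (by omega), if_neg (by omega)]
  have hA : PySem.Str.findFrom content "[" (PySem.Str.find content "publications: [")
      = ((PySem.Str.findFrom content "[" (PySem.Str.find content "publications: [")).toNat : Int) := by
    omega
  rw [hA]
  rw [pvMain content.toList content.toList.length _ 0 (by omega)]
  simp only [Int.toNat_natCast]
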